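-- pv_equiv track=rewrite | github.com/liu770807152/Python-Training | Final2/Lab10/exercises/Q2.py | make_inv_dict
-- ===== SOURCE A (Python) =====
-- def make_inv_dict(adict):
--     if len(adict) > 0:
--         # 把原输入字典修改了，结果最后原字典被清空了!!!
--         key, val = adict.popitem()
--         adict = make_inv_dict(adict)
--         if val not in adict.values():
--             adict[key] = val
--         return adict
--     else:
--         return {}
-- ===== SOURCE B (Python) =====
-- def make_inv_dict(adict):
--     # One pass with a set of seen values instead of A's recursive popitem +
--     # O(n) result.values() scan; input dict is cleared like A leaves it.
--     result = {}
--     seen = set()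
--     for key, val in adict.items():
--         if val not in seen:
--             seen.add(val)
--             result[key] = val
--     adict.clear()
--     return result
-- ===== Notes on version B (the rewrite author's own statement) =====
-- stated objective: faster
-- what changed: Replaces A's recursive popitem-and-rebuild with a single forward loop that keeps the first key per value, using a hash set of seen values so the inner result.values() scan disappears.
import Mathlib
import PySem

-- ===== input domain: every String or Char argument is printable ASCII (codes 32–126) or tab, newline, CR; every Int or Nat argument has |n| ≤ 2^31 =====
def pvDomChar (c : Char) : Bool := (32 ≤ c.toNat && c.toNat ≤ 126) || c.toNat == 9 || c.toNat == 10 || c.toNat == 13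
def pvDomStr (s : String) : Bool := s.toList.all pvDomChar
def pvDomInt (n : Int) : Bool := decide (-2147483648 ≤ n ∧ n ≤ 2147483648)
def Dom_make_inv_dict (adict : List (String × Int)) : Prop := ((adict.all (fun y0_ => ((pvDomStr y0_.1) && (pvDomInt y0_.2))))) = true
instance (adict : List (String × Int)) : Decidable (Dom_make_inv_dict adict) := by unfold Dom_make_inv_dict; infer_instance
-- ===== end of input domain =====

-- B replaces A's recursive popitem rebuild by one forward loop with a set of seen
-- values; equivalence is about the RETURN value only (the Python A empties its
-- argument dict in place, and B reproduces that with adict.clear()).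

-- ===== PORT A =====
-- A pops the LAST item (popitem), recurses on the rest, then re-adds the pair if
-- its value is absent from the recursive result's values. Recursing on the
-- reversed items list makes that structural: the head of the reversed list is
-- exactly the pair popitem removes.
def makeInvDictRecA : List (String × Int) → PySem.Dict String Int
  | [] => PySem.Dict.empty
  | (key, val) :: rest =>
      let d := makeInvDictRecA rest
      if (PySem.Dict.values d).contains val then d else d.insert key val

def make_inv_dict (adict : List (String × Int)) : List (String × Int) :=
  (makeInvDictRecA (PySem.Dict.ofList adict).items.reverse).items

-- ===== PORT B =====
def make_inv_dict_alt (adict : List (String × Int)) : List (String × Int) :=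
  ((PySem.Dict.ofList adict).items.foldl
    (fun (st : PySem.Set Int × PySem.Dict String Int) kv =>
      if PySem.Set.contains st.1 kv.2 then st
      else (PySem.Set.add st.1 kv.2, st.2.insert kv.1 kv.2))
    (PySem.Set.empty, PySem.Dict.empty)).2.items

-- ===== PRECONDITION & SPEC =====
def Spec_make_inv_dict (adict : List (String × Int)) (out : List (String × Int)) : Prop := out = make_inv_dict_alt adict
instance (adict : List (String × Int)) (out : List (String × Int)) : Decidable (Spec_make_inv_dict adict out) := by unfold Spec_make_inv_dict; infer_instance

-- ===== CLAIM (what is proved, stated in full; the proofs are below) =====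
def Claim_equal_make_inv_dict : Prop := ∀ (adict : List (String × Int)), Dom_make_inv_dict adict → Spec_make_inv_dict adict (make_inv_dict adict)

-- ===== LEMMAS AND PROOFS =====

-- A's step, forward over the items list.
def stepA (d : PySem.Dict String Int) (kv : String × Int) : PySem.Dict String Int :=
  if (PySem.Dict.values d).contains kv.2 then d else d.insert kv.1 kv.2

lemma recA_reverse (l : List (String × Int)) :
    makeInvDictRecA l.reverse = l.foldl stepA PySem.Dict.empty := by
  suffices h : ∀ m : List (String × Int), makeInvDictRecA m = m.reverse.foldl stepA PySem.Dict.empty by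
    simpa using h l.reverse
  intro m
  induction m with
  | nil => rfl
  | cons kv rest ih =>
    obtain ⟨k, v⟩ := kv
    simp [makeInvDictRecA, ih, List.foldl_append, stepA]

def stepB (st : PySem.Set Int × PySem.Dict String Int) (kv : String × Int) :
    PySem.Set Int × PySem.Dict String Int :=
  if PySem.Set.contains st.1 kv.2 then st
  else (PySem.Set.add st.1 kv.2, st.2.insert kv.1 kv.2)

-- Loop invariant: the seen-set holds exactly the result's values, and the result's
-- keys stay disjoint from the keys still to be processed.
lemma foldl_stepB_snd (l : List (String × Int)) (seen : PySem.Set Int)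
    (d : PySem.Dict String Int)
    (hseen : ∀ v : Int, PySem.Set.contains seen v = (PySem.Dict.values d).contains v)
    (hfresh : ∀ p ∈ l, d.contains p.1 = false)
    (hnd : (l.map Prod.fst).Nodup) :
    (l.foldl stepB (seen, d)).2 = l.foldl stepA d := by
  induction l generalizing seen d with
  | nil => rfl
  | cons kv rest ih =>
    obtain ⟨k, v⟩ := kv
    simp only [List.foldl_cons]
    have hk : d.contains k = false := hfresh (k, v) (by simp)
    simp only [List.map_cons, List.nodup_cons] at hnd
    by_cases hc : PySem.Set.contains seen v = true
    · have hc' : (PySem.Dict.values d).contains v = true := by rw [← hseen]; exact hc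
      have e1 : stepB (seen, d) (k, v) = (seen, d) := by
        simp only [stepB]; rw [if_pos hc]
      have e2 : stepA d (k, v) = d := by
        simp only [stepA]; rw [if_pos hc']
      rw [e1, e2]
      exact ih seen d hseen (fun p hp => hfresh p (by simp [hp])) hnd.2
    · have hc' : ¬ (PySem.Dict.values d).contains v = true := by rw [← hseen]; exact hc
      have e1 : stepB (seen, d) (k, v) = (PySem.Set.add seen v, d.insert k v) := by
        simp only [stepB]; rw [if_neg hc]
      have e2 : stepA d (k, v) = d.insert k v := by
        simp only [stepA]; rw [if_neg hc']
      rw [e1, e2]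
      have hitems : (d.insert k v).items = d.items ++ [(k, v)] := by
        rw [PySem.Dict.items_insert]; rw [hk]; rfl
      have hval : (PySem.Dict.values (d.insert k v)) = PySem.Dict.values d ++ [v] := by
        simp [PySem.Dict.values, hitems]
      have hadd : PySem.Set.add seen v = seen ++ [v] := by
        simp only [PySem.Set.add]; exact if_neg hc
      refine ih _ _ ?_ ?_ hnd.2
      · intro w
        rw [hadd, hval]
        have h' : decide (w ∈ seen) = decide (w ∈ PySem.Dict.values d) := by
          simpa using hseen w
        simp [h']
      · intro p hp
        have hne : p.1 ≠ k := fun h => hnd.1 (h ▸ (List.mem_map_of_mem hp))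
        rw [PySem.Dict.contains_insert]
        simp [hfresh p (by simp [hp]), hne]

-- ===== VERDICT (by name: the statement is the Claim_ definition above) =====
theorem make_inv_dict_spec : Claim_equal_make_inv_dict := by
  intro adict _
  unfold Spec_make_inv_dict make_inv_dict make_inv_dict_alt
  rw [recA_reverse]
  have hnd : ((PySem.Dict.ofList adict).items.map Prod.fst).Nodup := by
    have := PySem.Dict.nodup_keys_ofList (κ := String) (ν := Int) adict
    simpa [PySem.Dict.keys] using this
  rw [← foldl_stepB_snd _ PySem.Set.empty PySem.Dict.empty
        (by intro v; rfl)
        (by intro p _; rfl) hnd]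
  rfl
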